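-- pv_equiv track=rewrite | github.com/Theathiestmonk/Agent_Emily | backend/agents/tools/Orion_Analytics_query.py | _transform_post_metrics
-- ===== SOURCE A (Python) =====
-- from typing import Dict, Any, List, Optional, Tuple
--
-- def _transform_post_metrics(post_metrics: Dict[str, Any], requested_metrics: List[str]) -> Dict[str, Any]:
--     """Transform post metrics from API format (likes_count) to user format (likes)."""
--     result = {}
--
--     if "likes" in requested_metrics or "like" in [m.lower() for m in requested_metrics]:
--         result["likes"] = post_metrics.get("likes_count", 0) or 0
--
--     if "comments" in requested_metrics or "comment" in [m.lower() for m in requested_metrics]: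
--         result["comments"] = post_metrics.get("comments_count", 0) or 0
--
--     if "shares" in requested_metrics or "share" in [m.lower() for m in requested_metrics]:
--         result["shares"] = post_metrics.get("shares_count", 0) or 0
--
--     return result
-- ===== SOURCE B (Python) =====
-- _PLURAL = {"likes": "likes", "comments": "comments", "shares": "shares"}
-- _SINGULAR = {"like": "likes", "comment": "comments", "share": "shares"}
--
-- def _transform_post_metrics(post_metrics, requested_metrics):
--     """Transform post metrics from API format (likes_count) to user format (likes)."""
--     selected = set()
--     for m in requested_metrics:
--         p = _PLURAL.get(m)
--         if p is not None:
--             selected.add(p)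
--         s = _SINGULAR.get(m.lower())
--         if s is not None:
--             selected.add(s)
--     return {k: post_metrics.get(k + "_count", 0) or 0
--             for k in ("likes", "comments", "shares") if k in selected}
-- ===== Notes on version B (the rewrite author's own statement) =====
-- stated objective: alternative
-- what changed: Inverts the iteration: instead of A's three membership scans over requested_metrics (rebuilding the lowered list for each), B makes one classification pass over requested_metrics, mapping each entry through two constant lookup tables (exact plural names, lowercased singular names) into a set of selected keys, then emits the result dict from that set in fixed key order.
import Mathlib
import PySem

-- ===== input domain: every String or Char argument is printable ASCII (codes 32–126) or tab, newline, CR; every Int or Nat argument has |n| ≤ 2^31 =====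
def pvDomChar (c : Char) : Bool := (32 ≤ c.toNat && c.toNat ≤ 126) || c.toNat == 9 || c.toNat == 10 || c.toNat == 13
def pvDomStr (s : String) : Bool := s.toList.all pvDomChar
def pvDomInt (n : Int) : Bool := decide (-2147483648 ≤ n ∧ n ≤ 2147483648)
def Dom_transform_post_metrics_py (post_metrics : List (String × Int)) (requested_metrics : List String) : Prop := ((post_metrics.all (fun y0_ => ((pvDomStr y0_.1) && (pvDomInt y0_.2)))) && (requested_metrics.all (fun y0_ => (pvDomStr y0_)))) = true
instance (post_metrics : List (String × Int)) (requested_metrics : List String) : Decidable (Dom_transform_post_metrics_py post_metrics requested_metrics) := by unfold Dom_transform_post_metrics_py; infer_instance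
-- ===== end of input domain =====

-- B replaces A's three membership scans over requested_metrics by ONE classification pass:
-- each requested entry is mapped through two lookup tables (exact plural, lowered singular)
-- into a set of selected keys, then the result dict is emitted from that set (objective: alternative).


-- ===== PORT A =====
-- Literal transliteration of A: three separate if-branches, each re-computing the
-- lowered list; 'x or 0' on an Int is 'if x == 0 then 0 else x'.
def transform_post_metrics_py (post_metrics : List (String × Int)) (requested_metrics : List String) : List (String × Int) :=
  let pm : PySem.Dict String Int := PySem.Dict.mk post_metrics
  let result : PySem.Dict String Int := PySem.Dict.empty
  let result :=
    if requested_metrics.contains "likes" || (requested_metrics.map PySem.Str.lower).contains "like" then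
      result.insert "likes" (let v := pm.getD "likes_count" 0; if v == 0 then 0 else v)
    else result
  let result :=
    if requested_metrics.contains "comments" || (requested_metrics.map PySem.Str.lower).contains "comment" then
      result.insert "comments" (let v := pm.getD "comments_count" 0; if v == 0 then 0 else v)
    else result
  let result :=
    if requested_metrics.contains "shares" || (requested_metrics.map PySem.Str.lower).contains "share" then
      result.insert "shares" (let v := pm.getD "shares_count" 0; if v == 0 then 0 else v)
    else result
  result.items

-- ===== PORT B =====
-- B's module-level lookup tables.
def pvPluralTab : PySem.Dict String String :=
  PySem.Dict.mk [("likes", "likes"), ("comments", "comments"), ("shares", "shares")]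
def pvSingularTab : PySem.Dict String String :=
  PySem.Dict.mk [("like", "likes"), ("comment", "comments"), ("share", "shares")]

-- Body of B's classification loop: one requested entry updates the selected set.
def pvSelStep (sel : PySem.Set String) (m : String) : PySem.Set String :=
  let sel :=
    match pvPluralTab.get? m with
    | some p => PySem.Set.add sel p
    | none => sel
  match pvSingularTab.get? (PySem.Str.lower m) with
  | some s => PySem.Set.add sel s
  | none => sel

-- Literal transliteration of B: classify requested_metrics once into a set of
-- selected canonical keys, then emit the result dict from that set.
def transform_post_metrics_py_alt (post_metrics : List (String × Int)) (requested_metrics : List String) : List (String × Int) :=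
  let pm : PySem.Dict String Int := PySem.Dict.mk post_metrics
  let selected : PySem.Set String := requested_metrics.foldl pvSelStep PySem.Set.empty
  (["likes", "comments", "shares"].foldl
    (fun (r : PySem.Dict String Int) k =>
      if PySem.Set.contains selected k then
        r.insert k (let v := pm.getD (k ++ "_count") 0; if v == 0 then 0 else v)
      else r)
    PySem.Dict.empty).items

-- ===== PRECONDITION & SPEC =====
def Spec_transform_post_metrics_py (post_metrics : List (String × Int)) (requested_metrics : List String) (out : List (String × Int)) : Prop := out = transform_post_metrics_py_alt post_metrics requested_metrics
instance (post_metrics : List (String × Int)) (requested_metrics : List String) (out : List (String × Int)) : Decidable (Spec_transform_post_metrics_py post_metrics requested_metrics out) := by unfold Spec_transform_post_metrics_py; infer_instance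

-- ===== CLAIM (what is proved, stated in full; the proofs are below) =====
def Claim_equal_transform_post_metrics_py : Prop := ∀ (post_metrics : List (String × Int)) (requested_metrics : List String), Dom_transform_post_metrics_py post_metrics requested_metrics → Spec_transform_post_metrics_py post_metrics requested_metrics (transform_post_metrics_py post_metrics requested_metrics)

-- ===== LEMMAS AND PROOFS =====
-- Membership of one canonical key after one classification step.
theorem mem_pvSelStep (k sk : String) (sel : PySem.Set String) (m : String)
    (hk : (k, sk) ∈ [("likes", "like"), ("comments", "comment"), ("shares", "share")]) :
    k ∈ pvSelStep sel m ↔ k ∈ sel ∨ m = k ∨ PySem.Str.lower m = sk := by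
  fin_cases hk <;>
  · unfold pvSelStep pvPluralTab pvSingularTab
    by_cases h1 : m = "likes" <;> by_cases h2 : m = "comments" <;> by_cases h3 : m = "shares" <;>
    by_cases g1 : PySem.Str.lower m = "like" <;> by_cases g2 : PySem.Str.lower m = "comment" <;>
    by_cases g3 : PySem.Str.lower m = "share" <;>
    simp_all [PySem.Dict.get?, PySem.Set.mem_add,
      show PySem.Str.lower "likes" = "likes" by decide,
      show PySem.Str.lower "comments" = "comments" by decide,
      show PySem.Str.lower "shares" = "shares" by decide]
    all_goals (try rw [show List.find? (fun p => p.1 == m) [("likes", "likes"), ("comments", "comments"), ("shares", "shares")] = none by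
      simp [*, Ne.symm h1, Ne.symm h2, Ne.symm h3]])
    all_goals (try rw [show List.find? (fun p => p.1 == PySem.Str.lower m) [("like", "likes"), ("comment", "comments"), ("share", "shares")] = none by
      simp [Ne.symm g1, Ne.symm g2, Ne.symm g3]])
    all_goals simp_all

-- Membership of one canonical key in the classified set, by induction on the pass.
theorem mem_foldl_pvSelStep (k sk : String)
    (hk : (k, sk) ∈ [("likes", "like"), ("comments", "comment"), ("shares", "share")]) :
    ∀ (rm : List String) (sel : PySem.Set String),
      k ∈ rm.foldl pvSelStep sel ↔ k ∈ sel ∨ k ∈ rm ∨ sk ∈ rm.map PySem.Str.lower := by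
  intro rm
  induction rm with
  | nil => simp
  | cons m rest ih =>
    intro sel
    simp only [List.foldl_cons, ih, mem_pvSelStep k sk sel m hk, List.mem_cons, List.map_cons]
    constructor <;> (intro h; rcases h with h | h | h) <;> simp_all <;> tauto

-- B's selection test equals A's membership test, as Booleans.
theorem contains_sel (k sk : String) (rm : List String)
    (hk : (k, sk) ∈ [("likes", "like"), ("comments", "comment"), ("shares", "share")]) :
    PySem.Set.contains (rm.foldl pvSelStep PySem.Set.empty) k
      = (rm.contains k || (rm.map PySem.Str.lower).contains sk) := by
  rw [Bool.eq_iff_iff, PySem.Set.contains_iff, mem_foldl_pvSelStep k sk hk rm PySem.Set.empty]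
  simp [PySem.Set.empty]

-- ===== VERDICT (by name: the statement is the Claim_ definition above) =====
theorem transform_post_metrics_py_spec : Claim_equal_transform_post_metrics_py := by
  intro pm rm _
  unfold Spec_transform_post_metrics_py transform_post_metrics_py transform_post_metrics_py_alt
  simp only [List.foldl,
    contains_sel "likes" "like" rm (by simp),
    contains_sel "comments" "comment" rm (by simp),
    contains_sel "shares" "share" rm (by simp)]
  rw [show "likes" ++ "_count" = "likes_count" by decide,
      show "comments" ++ "_count" = "comments_count" by decide,
      show "shares" ++ "_count" = "shares_count" by decide]
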